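-- pv_equiv track=rewrite | github.com/ADoublLEN/Meeseeks | src_code/rule_utils_eng/yayun.py | extract_spanish_rhyme_endings
-- ===== SOURCE A (Python) =====
-- def get_rhyme_key_from_last_vowel(word, vowels):
--     """
--     统一的韵脚提取方法：从最后一个元音到单词尾部
--     """
--     if not word:
--         return None
--
--     word = word.lower().strip()
--
--     # 找到最后一个元音的位置
--     last_vowel_pos = -1
--     for i in range(len(word) - 1, -1, -1):
--         if word[i] in vowels:
--             last_vowel_pos = i
--             break
--
--     if last_vowel_pos == -1:
--         # 没有元音，返回最后2个字符
--         return word[-2:] if len(word) >= 2 else word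
--
--     # 从最后一个元音到单词结尾
--     return word[last_vowel_pos:]
--
-- def get_spanish_rhyme_key(word):
--     """
--     获取西班牙语单词的押韵键值（使用统一逻辑）
--     """
--     vowels = 'aeiouáéíóú'
--     return get_rhyme_key_from_last_vowel(word, vowels)
--
-- def extract_spanish_rhyme_endings(sentences):
--     """
--     提取每个西班牙语句子最后一个单词的押韵键值
--     """
--     rhyme_keys = []
--
--     for sentence in sentences:
--         if sentence:
--             words = sentence.split()
--             if words:
--                 last_word = words[-1].lower()
--                 rhyme_key = get_spanish_rhyme_key(last_word)
--                 if rhyme_key: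
--                     rhyme_keys.append(rhyme_key)
--
--     return rhyme_keys
-- ===== SOURCE B (Python) =====
-- VOWELS = 'aeiouáéíóú'
--
-- def _rhyme_key(word):
--     w = word.lower().strip()
--     positions = [i for i, ch in enumerate(w) if ch in VOWELS]
--     if positions:
--         return w[positions[-1]:]
--     return w[-2:] if len(w) >= 2 else w
--
-- def extract_spanish_rhyme_endings(sentences):
--     keys = []
--     for sentence in sentences:
--         words = sentence.split()
--         if words:
--             key = _rhyme_key(words[-1].lower())
--             if key:
--                 keys.append(key)
--     return keys
-- ===== Notes on version B (the rewrite author's own statement) =====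
-- stated objective: alternative
-- what changed: The last-vowel position is computed by a forward enumerate-and-filter pass (collect all vowel indices, take the last) instead of A's manual backward index scan with a break, and the per-sentence plumbing is folded into one helper.
import Mathlib
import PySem

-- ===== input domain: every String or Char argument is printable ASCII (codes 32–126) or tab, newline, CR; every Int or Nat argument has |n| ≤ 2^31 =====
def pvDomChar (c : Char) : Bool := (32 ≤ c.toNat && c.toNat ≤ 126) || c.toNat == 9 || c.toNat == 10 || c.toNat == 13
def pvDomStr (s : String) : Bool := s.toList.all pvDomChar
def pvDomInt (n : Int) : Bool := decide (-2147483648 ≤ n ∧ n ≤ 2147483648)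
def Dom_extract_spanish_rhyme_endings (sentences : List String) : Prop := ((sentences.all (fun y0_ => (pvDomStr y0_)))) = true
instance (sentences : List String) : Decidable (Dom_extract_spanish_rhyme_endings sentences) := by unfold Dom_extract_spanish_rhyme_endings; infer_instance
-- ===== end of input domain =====

-- B replaces A's manual backward scan-with-break for the last vowel by a forward
-- enumerate-and-filter pass (collect all vowel positions, take the last); same results, similar cost ("alternative").


-- ===== PORT A =====
-- A's inner `for i in range(len(word)-1, -1, -1): if word[i] in vowels: last_vowel_pos = i; break`
def pvLoopA (w vs : List Char) : List Int → Int
  | [] => -1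
  | i :: rest =>
    match PySem.List.pyGet? w i with
    | some c => if PySem.Chars.isIn [c] vs then i else pvLoopA w vs rest
    | none => pvLoopA w vs rest

def get_rhyme_key_from_last_vowel (word : String) (vowels : String) : Option String :=
  if word.toList = [] then none     -- `if not word: return None`
  else
    let w := PySem.Chars.strip (PySem.Chars.lower word.toList)   -- word = word.lower().strip()
    let last_vowel_pos := pvLoopA w vowels.toList (PySem.List.pyRange ((w.length : Int) - 1) (-1) (-1))
    if last_vowel_pos = -1 then
      if 2 ≤ w.length then some (String.ofList (PySem.Chars.slice w (some (-2)) none))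
      else some (String.ofList w)
    else some (String.ofList (PySem.Chars.slice w (some last_vowel_pos) none))

def get_spanish_rhyme_key (word : String) : Option String :=
  get_rhyme_key_from_last_vowel word "aeiouáéíóú"

-- the body of A's `for sentence in sentences:` loop
def pvStepA (rhyme_keys : List String) (sentence : String) : List String :=
  if sentence.toList = [] then rhyme_keys     -- `if sentence:`
  else
    let words := PySem.Chars.split₀ sentence.toList
    if words = [] then rhyme_keys             -- `if words:`
    else
      match PySem.List.pyGet? words (-1) with -- words[-1]
      | none => rhyme_keys
      | some lw =>
        match get_spanish_rhyme_key (String.ofList (PySem.Chars.lower lw)) with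
        | none => rhyme_keys
        | some k => if k.toList = [] then rhyme_keys else rhyme_keys ++ [k]  -- `if rhyme_key:`

def extract_spanish_rhyme_endings (sentences : List String) : List String :=
  sentences.foldl pvStepA []

-- ===== PORT B =====
def pvVowels : String := "aeiouáéíóú"

def pvRhymeKeyAlt (word : String) : String :=
  let w := PySem.Chars.strip (PySem.Chars.lower word.toList)   -- w = word.lower().strip()
  -- positions = [i for i, ch in enumerate(w) if ch in VOWELS]
  let positions := (PySem.List.enumerate w 0).filterMap
      (fun p => if PySem.Chars.isIn [p.2] pvVowels.toList then some p.1 else none)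
  match positions.getLast? with                                -- `if positions: return w[positions[-1]:]`
  | some pos => String.ofList (PySem.Chars.slice w (some pos) none)
  | none =>
    if 2 ≤ w.length then String.ofList (PySem.Chars.slice w (some (-2)) none)
    else String.ofList w

-- the body of B's `for sentence in sentences:` loop
def pvStepB (keys : List String) (sentence : String) : List String :=
  match (PySem.Chars.split₀ sentence.toList).getLast? with     -- `if words:` + words[-1]
  | none => keys
  | some lw =>
    let key := pvRhymeKeyAlt (String.ofList (PySem.Chars.lower lw))
    if key.toList = [] then keys else keys ++ [key]            -- `if key:`

def extract_spanish_rhyme_endings_alt (sentences : List String) : List String :=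
  sentences.foldl pvStepB []

-- ===== PRECONDITION & SPEC =====
def Spec_extract_spanish_rhyme_endings (sentences : List String) (out : List String) : Prop := out = extract_spanish_rhyme_endings_alt sentences
instance (sentences : List String) (out : List String) : Decidable (Spec_extract_spanish_rhyme_endings sentences out) := by unfold Spec_extract_spanish_rhyme_endings; infer_instance

-- ===== CLAIM (what is proved, stated in full; the proofs are below) =====
def Claim_equal_extract_spanish_rhyme_endings : Prop := ∀ (sentences : List String), Dom_extract_spanish_rhyme_endings sentences → Spec_extract_spanish_rhyme_endings sentences (extract_spanish_rhyme_endings sentences)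

-- ===== LEMMAS AND PROOFS =====

-- `word[j] in vowels`, as a predicate on the index
def pvP (w vs : List Char) (j : Nat) : Bool :=
  match w[j]? with
  | some c => PySem.Chars.isIn [c] vs
  | none => false

-- A's backward loop over a list of Nat indices returns the first match
theorem pvLoopA_eq_find (w vs : List Char) (M : List Nat) :
    pvLoopA w vs (M.map (Nat.cast : Nat → Int)) =
      (match M.find? (pvP w vs) with
       | some j => (j : Int)
       | none => -1) := by
  induction M with
  | nil => rfl
  | cons j rest ih =>
    rw [List.map_cons, List.find?_cons]
    have hunf : pvLoopA w vs ((j : Int) :: rest.map (Nat.cast : Nat → Int)) =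
        (match PySem.List.pyGet? w (j : Int) with
         | some c => if PySem.Chars.isIn [c] vs then (j : Int) else pvLoopA w vs (rest.map (Nat.cast : Nat → Int))
         | none => pvLoopA w vs (rest.map (Nat.cast : Nat → Int))) := rfl
    rw [hunf, PySem.List.pyGet?_natCast w j]
    rcases h : w[j]? with _ | c
    · have hp : pvP w vs j = false := by simp [pvP, h]
      rw [hp]; exact ih
    · have hp : pvP w vs j = PySem.Chars.isIn [c] vs := by simp [pvP, h]
      rw [hp]
      cases hv : PySem.Chars.isIn [c] vs
      · simpa [hv] using ih
      · simp [hv]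

-- range(n-1, -1, -1) is the reversed index list
theorem pvRange_desc (n : Nat) :
    PySem.List.pyRange ((n : Int) - 1) (-1) (-1) = ((List.range n).reverse).map (Nat.cast : Nat → Int) := by
  rcases Nat.eq_zero_or_pos n with h0 | h0
  · subst h0; rfl
  · simp only [PySem.List.pyRange]
    norm_num
    rw [if_pos h0, ← List.map_reverse]
    have hrev : (List.range n).reverse = (List.range n).map (fun x => n - 1 - x) := by
      apply List.ext_getElem
      · simp
      · intro i h1 h2
        simp [List.getElem_reverse]
    rw [hrev, List.map_map]
    refine List.map_eq_map_iff.mpr ?_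
    intro k hk
    have hkn : k < n := List.mem_range.mp hk
    simp only [Function.comp]
    omega

-- B's comprehension over enumerate, as a filtered index range
theorem pvEnum_filterMap (vs : List Char) (cs : List Char) (s : Nat) :
    ((PySem.List.enumerate cs (s : Int)).filterMap
        (fun p => if PySem.Chars.isIn [p.2] vs then some p.1 else none)) =
      ((List.range cs.length).filter (pvP cs vs)).map (fun i => ((s + i : Nat) : Int)) := by
  induction cs generalizing s with
  | nil => rfl
  | cons c t ih =>
    have hstep : PySem.List.enumerate (c :: t) (s : Int) = ((s : Int), c) :: PySem.List.enumerate t ((s : Int) + 1) := rfl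
    have hcast : ((s : Int) + 1) = ((s + 1 : Nat) : Int) := by push_cast; ring
    rw [hstep, hcast]
    simp only [List.filterMap_cons, List.length_cons, List.range_succ_eq_map, List.filter_cons,
      List.filter_map, ih (s + 1)]
    have hp0 : pvP (c :: t) vs 0 = PySem.Chars.isIn [c] vs := rfl
    have hps : (pvP (c :: t) vs) ∘ Nat.succ = pvP t vs := by
      funext i; simp [pvP, Function.comp]
    rw [hp0, hps]
    cases hv : PySem.Chars.isIn [c] vs
    · simp
      intro k _ _
      omega
    · simp
      intro k _ _
      omega

-- B's comprehension started at 0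
theorem pvEnum_zero (vs cs : List Char) :
    ((PySem.List.enumerate cs 0).filterMap
        (fun p => if PySem.Chars.isIn [p.2] vs then some p.1 else none)) =
      ((List.range cs.length).filter (pvP cs vs)).map (Nat.cast : Nat → Int) := by
  have h := pvEnum_filterMap vs cs 0
  simpa using h

-- xs[-1] is the last element
theorem pvGet_neg_one {α : Type} (xs : List α) : PySem.List.pyGet? xs (-1) = xs.getLast? := by
  rcases xs with _ | ⟨a, t⟩
  · rfl
  · simp [PySem.List.pyGet?, PySem.List.pyIdx?, List.getLast?_eq_getElem?]

-- an empty word yields an empty key in B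
theorem pvKeyAlt_of_nil (word : String) (h : word.toList = []) : (pvRhymeKeyAlt word).toList = [] := by
  simp only [pvRhymeKeyAlt, h]
  rfl

-- the two key extractions agree on every nonempty word
theorem pvKey_eq (word : String) (hne : ¬ word.toList = []) :
    get_rhyme_key_from_last_vowel word "aeiouáéíóú" = some (pvRhymeKeyAlt word) := by
  simp only [get_rhyme_key_from_last_vowel, pvRhymeKeyAlt, if_neg hne]
  rw [show ("aeiouáéíóú" : String) = pvVowels from rfl]
  rw [pvRange_desc, pvLoopA_eq_find, pvEnum_zero]
  rw [List.getLast?_map, List.getLast?_eq_head?_reverse, ← List.filter_reverse, List.head?_filter]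
  rcases h : (List.range (PySem.Chars.strip (PySem.Chars.lower word.toList)).length).reverse.find?
      (pvP (PySem.Chars.strip (PySem.Chars.lower word.toList)) pvVowels.toList) with _ | j
  · simp only [Option.map_none]
    exact (apply_ite some _ _ _).symm
  · have hj : ((j : Int)) ≠ -1 := by omega
    simp [hj]

-- the two per-sentence steps agree
theorem pvStep_eq (acc : List String) (sentence : String) : pvStepA acc sentence = pvStepB acc sentence := by
  unfold pvStepA pvStepB
  by_cases hs : sentence.toList = []
  · rw [hs]; rfl
  · simp only [if_neg hs, pvGet_neg_one]
    rcases h : (PySem.Chars.split₀ sentence.toList).getLast? with _ | lw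
    · have hnil : PySem.Chars.split₀ sentence.toList = [] := List.getLast?_eq_none_iff.mp h
      simp [hnil]
    · have hw : ¬ PySem.Chars.split₀ sentence.toList = [] := by
        intro hc; rw [hc] at h; simp at h
      simp only [if_neg hw]
      by_cases hlw : (PySem.Chars.lower lw) = []
      · have hA : get_spanish_rhyme_key (String.ofList (PySem.Chars.lower lw)) = none := by
          simp [get_spanish_rhyme_key, get_rhyme_key_from_last_vowel, hlw]
        have hB := pvKeyAlt_of_nil (String.ofList (PySem.Chars.lower lw)) (by simp [hlw])
        rw [hA, hB]
        simp
      · have hA := pvKey_eq (String.ofList (PySem.Chars.lower lw)) (by simp [hlw])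
        rw [get_spanish_rhyme_key, hA]

-- fold the step agreement through the loop
theorem pvFold_eq (ts : List String) (acc : List String) :
    ts.foldl pvStepA acc = ts.foldl pvStepB acc := by
  induction ts generalizing acc with
  | nil => rfl
  | cons s t ih => rw [List.foldl_cons, List.foldl_cons, pvStep_eq, ih]

-- ===== VERDICT (by name: the statement is the Claim_ definition above) =====
theorem extract_spanish_rhyme_endings_spec : Claim_equal_extract_spanish_rhyme_endings := by
  intro sentences _
  unfold Spec_extract_spanish_rhyme_endings extract_spanish_rhyme_endings extract_spanish_rhyme_endings_alt
  exact pvFold_eq sentences []
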